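-- pv_equiv track=rewrite | github.com/bockeljd/basement-bets | src/settlement_engine.py | grade_bet_slip
-- ===== SOURCE A (Python) =====
-- from typing import List, Dict, Optional
--
-- def grade_bet_slip(bet_legs: List[Dict]) -> str:
--     """
--     Aggregate leg statuses into a final slip status.
--     Parlay Rules:
--     - Any Loss -> Loss
--     - All Win -> Win
--     - Any Open/Pending -> Pending
--     - Push/Void -> Ignore leg (reduce odds)
--     """
--     # If any leg is pending, the whole slip is pending
--     for leg in bet_legs:
--         if leg['status'].upper() in ['PENDING', 'OPEN']:
--             return 'PENDING'
--
--     # If any leg is lost, the whole slip is lost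
--     for leg in bet_legs:
--         if leg['status'].upper() in ['LOSS', 'LOSE', 'LOST']:
--             return 'LOST'
--
--     # Check for wins
--     has_win = False
--     all_push = True
--     for leg in bet_legs:
--         if leg['status'].upper() in ['WIN', 'WON']:
--             has_win = True
--             all_push = False
--         elif leg['status'].upper() not in ['PUSH', 'VOID', 'CANCELLED']:
--             # Should be unreachable if we checked pending/loss
--             pass
--
--     if has_win:
--         return 'WON'
--     elif all_push:
--         return 'PUSH'
--
--     return 'LOST' # Default fallback
-- ===== SOURCE B (Python) =====
-- def grade_bet_slip(bet_legs):
--     seen = set()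
--     for leg in bet_legs:
--         s = leg['status'].upper()
--         if s in ('PENDING', 'OPEN'):
--             return 'PENDING'
--         seen.add(s)
--     if seen & {'LOSS', 'LOSE', 'LOST'}:
--         return 'LOST'
--     if seen & {'WIN', 'WON'}:
--         return 'WON'
--     return 'PUSH'
-- ===== Notes on version B (the rewrite author's own statement) =====
-- stated objective: simpler
-- what changed: A scans the legs three separate times (pending pass, loss pass, win/push fold); B makes one pass that returns PENDING immediately on a pending/open leg and otherwise collects uppercased statuses into a set, then grades by set-intersection checks.
import Mathlib
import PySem

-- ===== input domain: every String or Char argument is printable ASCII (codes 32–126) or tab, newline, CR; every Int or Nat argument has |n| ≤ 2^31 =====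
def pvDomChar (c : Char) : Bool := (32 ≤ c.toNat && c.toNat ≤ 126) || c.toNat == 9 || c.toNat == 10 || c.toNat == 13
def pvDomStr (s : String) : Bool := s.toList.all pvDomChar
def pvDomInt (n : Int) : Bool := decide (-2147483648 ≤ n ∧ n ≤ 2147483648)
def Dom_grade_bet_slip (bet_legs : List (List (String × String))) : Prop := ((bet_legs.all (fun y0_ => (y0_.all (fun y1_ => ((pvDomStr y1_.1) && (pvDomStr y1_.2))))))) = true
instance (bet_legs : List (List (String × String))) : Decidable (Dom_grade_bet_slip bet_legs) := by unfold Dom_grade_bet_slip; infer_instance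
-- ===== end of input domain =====

-- B replaces A's three repeated scans over the legs by one pass that short-circuits on a
-- pending leg and otherwise collects the uppercased statuses into a set, then grades from
-- set-intersection checks (objective: simpler).


-- shared literal word lists and membership tests of the Python sources
def pvPendWords : List String := ["PENDING", "OPEN"]
def pvLossWords : List String := ["LOSS", "LOSE", "LOST"]
def pvWinWords : List String := ["WIN", "WON"]
def pvIsPend (s : String) : Bool := pvPendWords.contains s
def pvIsLoss (s : String) : Bool := pvLossWords.contains s
def pvIsWin (s : String) : Bool := pvWinWords.contains s

-- ===== PORT A =====
-- leg['status'].upper(); Python raises KeyError when 'status' is missing — Pre_ excludes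
-- exactly the inputs where that lookup is reached, so the "" default is never taken inside Pre_.
def pvStatusA (leg : List (String × String)) : String :=
  PySem.Str.upper (PySem.Dict.getD (PySem.Dict.mk leg) "status" "")

def grade_bet_slip (bet_legs : List (List (String × String))) : String :=
  -- first loop: any pending/open leg → 'PENDING'
  if bet_legs.any (fun leg => pvIsPend (pvStatusA leg)) then "PENDING"
  -- second loop: any lost leg → 'LOST'
  else if bet_legs.any (fun leg => pvIsLoss (pvStatusA leg)) then "LOST"
  else
    -- third loop: state (has_win, all_push)
    let st := bet_legs.foldl (fun (acc : Bool × Bool) leg =>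
      if pvIsWin (pvStatusA leg) then (true, false) else acc) (false, true)
    if st.1 then "WON" else if st.2 then "PUSH" else "LOST"

-- ===== PORT B =====
-- same lookup convention as A's helper: the "" default is only taken outside Pre_ (KeyError in Python)
def pvStatusB (leg : List (String × String)) : String :=
  PySem.Str.upper (PySem.Dict.getD (PySem.Dict.mk leg) "status" "")

def pvAltLoop : List (List (String × String)) → PySem.Set String → String
  | [], seen =>
      if PySem.Set.inter seen pvLossWords ≠ [] then "LOST"
      else if PySem.Set.inter seen pvWinWords ≠ [] then "WON"
      else "PUSH"
  | leg :: rest, seen =>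
      let s := pvStatusB leg
      if pvIsPend s then "PENDING"
      else pvAltLoop rest (PySem.Set.add seen s)

def grade_bet_slip_alt (bet_legs : List (List (String × String))) : String :=
  pvAltLoop bet_legs PySem.Set.empty

-- ===== PRECONDITION & SPEC =====
-- helper for Pre_: the leg has a 'status' entry whose uppercased value is pending/open
def pvLegPending (leg : List (String × String)) : Bool :=
  match PySem.Dict.get? (PySem.Dict.mk leg) "status" with
  | some s => pvIsPend (PySem.Str.upper s)
  | none => false

-- Pre_ excludes exactly the inputs on which the Python A raises KeyError: a leg without a
-- 'status' key that is not preceded by a pending/open leg (B raises there identically).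
def Pre_grade_bet_slip (bet_legs : List (List (String × String))) : Prop :=
  ∀ i : Fin bet_legs.length,
    PySem.Dict.get? (PySem.Dict.mk bet_legs[i]) "status" = none →
    (bet_legs.take i).any pvLegPending = true
instance (bet_legs : List (List (String × String))) : Decidable (Pre_grade_bet_slip bet_legs) := by
  unfold Pre_grade_bet_slip; infer_instance

def pvWitness_grade_bet_slip : (List (List (String × String))) :=
  [[("status", "Win")], [("status", "push")]]

def Spec_grade_bet_slip (bet_legs : List (List (String × String))) (out : String) : Prop := out = grade_bet_slip_alt bet_legs
instance (bet_legs : List (List (String × String))) (out : String) : Decidable (Spec_grade_bet_slip bet_legs out) := by unfold Spec_grade_bet_slip; infer_instance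

-- ===== CLAIM (what is proved, stated in full; the proofs are below) =====
def Claim_equal_grade_bet_slip : Prop := ∀ (bet_legs : List (List (String × String))), Dom_grade_bet_slip bet_legs → Pre_grade_bet_slip bet_legs → Spec_grade_bet_slip bet_legs (grade_bet_slip bet_legs)

-- ===== LEMMAS AND PROOFS =====

lemma pvStatus_eq (leg : List (String × String)) : pvStatusB leg = pvStatusA leg := rfl

lemma pvFilter_ne_nil (s : List String) (p : String → Bool) :
    (s.filter p ≠ []) ↔ s.any p = true := by
  simp [List.filter_eq_nil_iff, List.any_eq_true, ne_eq]

lemma pvInter_loss (seen : PySem.Set String) :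
    (PySem.Set.inter seen pvLossWords ≠ []) ↔ seen.any pvIsLoss = true :=
  pvFilter_ne_nil seen pvIsLoss

lemma pvInter_win (seen : PySem.Set String) :
    (PySem.Set.inter seen pvWinWords ≠ []) ↔ seen.any pvIsWin = true :=
  pvFilter_ne_nil seen pvIsWin

lemma pvSet_any_add (s : PySem.Set String) (x : String) (p : String → Bool) :
    (PySem.Set.add s x).any p = (s.any p || p x) := by
  unfold PySem.Set.add
  by_cases h : PySem.Set.contains s x = true
  · rw [if_pos h]
    have hx : x ∈ s := by
      simpa [PySem.Set.contains, List.contains_iff_mem] using h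
    cases hp : p x
    · simp
    · have hs : s.any p = true := List.any_eq_true.2 ⟨x, hx, hp⟩
      simp [hs]
  · rw [if_neg h]
    simp

-- one-pass loop characterised as: pending short-circuit, then the three scans
lemma pvAltLoop_spec (legs : List (List (String × String))) (seen : PySem.Set String) :
    pvAltLoop legs seen =
      if legs.any (fun l => pvIsPend (pvStatusB l)) then "PENDING"
      else if (seen.any pvIsLoss || legs.any (fun l => pvIsLoss (pvStatusB l))) then "LOST"
      else if (seen.any pvIsWin || legs.any (fun l => pvIsWin (pvStatusB l))) then "WON"
      else "PUSH" := by
  induction legs generalizing seen with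
  | nil =>
      simp only [pvAltLoop, List.any_nil, Bool.false_eq_true, if_false, Bool.or_false]
      by_cases h1 : (PySem.Set.inter seen pvLossWords ≠ [])
      · rw [if_pos h1, if_pos ((pvInter_loss seen).1 h1)]
      · rw [if_neg h1, if_neg (fun hc => h1 ((pvInter_loss seen).2 hc))]
        by_cases h2 : (PySem.Set.inter seen pvWinWords ≠ [])
        · rw [if_pos h2, if_pos ((pvInter_win seen).1 h2)]
        · rw [if_neg h2, if_neg (fun hc => h2 ((pvInter_win seen).2 hc))]
  | cons leg rest ih =>
      cases hp : pvIsPend (pvStatusB leg) with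
      | true => simp [pvAltLoop, hp]
      | false =>
          simp only [pvAltLoop, hp, Bool.false_eq_true, if_false, List.any_cons, Bool.false_or,
            ih, pvSet_any_add]
          simp [Bool.or_assoc]

-- A's third loop: the fold ends in (anyWin, !anyWin)
lemma pvFoldWin (legs : List (List (String × String))) :
    legs.foldl (fun (acc : Bool × Bool) leg =>
        if pvIsWin (pvStatusA leg) then (true, false) else acc) (false, true)
      = (legs.any (fun l => pvIsWin (pvStatusA l)),
         !legs.any (fun l => pvIsWin (pvStatusA l))) := by
  have h : ∀ (ls : List (List (String × String))) (b : Bool),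
      ls.foldl (fun (acc : Bool × Bool) leg =>
          if pvIsWin (pvStatusA leg) then (true, false) else acc) (b, !b)
        = (b || ls.any (fun l => pvIsWin (pvStatusA l)),
           !(b || ls.any (fun l => pvIsWin (pvStatusA l)))) := by
    intro ls
    induction ls with
    | nil => intro b; simp
    | cons leg rest ih =>
        intro b
        cases hw : pvIsWin (pvStatusA leg)
        · simpa [hw] using ih b
        · simpa [hw] using ih true
  simpa using h legs false

-- ===== VERDICT (by name: the statement is the Claim_ definition above) =====
theorem grade_bet_slip_spec : Claim_equal_grade_bet_slip := by
  intro bet_legs _ _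
  unfold Spec_grade_bet_slip grade_bet_slip grade_bet_slip_alt
  rw [pvAltLoop_spec]
  simp only [pvStatus_eq, PySem.Set.empty, List.any_nil, Bool.false_or, pvFoldWin]
  cases h1 : bet_legs.any (fun l => pvIsPend (pvStatusA l)) <;>
    cases h2 : bet_legs.any (fun l => pvIsLoss (pvStatusA l)) <;>
    cases h3 : bet_legs.any (fun l => pvIsWin (pvStatusA l)) <;> simp
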